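-- pv_equiv track=rewrite | github.com/glehmann/WrapITK-unstable | igenerator.py | typeAndDecorators
-- ===== SOURCE A (Python) =====
-- def typeAndDecorators( s ):
--   end = ""
--   s = s.strip()
--   ends = [" ", "*", "&", "const"]
--   needToContinue = True
--   while needToContinue:
--     needToContinue = False
--     for e in ends:
--       if s.endswith( e ):
--         end = e + end
--         s = s[:-len(e)]
--         needToContinue = True
--   return (s, end)
-- ===== SOURCE B (Python) =====
-- def typeAndDecorators(s):
--     s = s.strip()
--     i = len(s)
--     while i > 0:
--         if s[i-1] in " *&":
--             i -= 1
--         elif i >= 5 and s[i-5:i] == "const":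
--             i -= 5
--         else:
--             break
--     return (s[:i], s[i:])
-- ===== Notes on version B (the rewrite author's own statement) =====
-- stated objective: simpler
-- what changed: Replaces A's restart-the-whole-scan while/for loop with repeated string re-slicing by a single backward index scan over the stripped string that returns one final split point.
import Mathlib
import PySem

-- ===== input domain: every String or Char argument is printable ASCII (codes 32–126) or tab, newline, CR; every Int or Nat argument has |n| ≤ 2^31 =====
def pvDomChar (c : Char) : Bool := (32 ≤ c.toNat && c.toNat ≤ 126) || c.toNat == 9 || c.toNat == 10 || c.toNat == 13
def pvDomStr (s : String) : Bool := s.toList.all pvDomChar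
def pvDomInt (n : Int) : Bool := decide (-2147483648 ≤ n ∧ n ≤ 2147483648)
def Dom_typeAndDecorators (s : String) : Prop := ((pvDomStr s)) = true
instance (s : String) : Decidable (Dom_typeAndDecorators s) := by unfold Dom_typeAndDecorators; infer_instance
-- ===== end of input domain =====

-- B replaces A's restart-the-whole-scan while loop and repeated string re-slicing by a single
-- backward index scan over the stripped string (objective: simpler/idiomatic; no speed claim).

-- ===== PORT A =====
-- ends = [" ", "*", "&", "const"]
def pvEndsA : List (List Char) := [[' '], ['*'], ['&'], ['c','o','n','s','t']]

-- one 'if s.endswith(e): end = e + end; s = s[:-len(e)]; needToContinue = True' step of A's for-loop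
def pvPassA (st : List Char × List Char × Bool) (e : List Char) : List Char × List Char × Bool :=
  if PySem.Chars.endswith st.1 e then
    (PySem.List.slice st.1 none (some (-(e.length : Int))), e ++ st.2.1, true)
  else st

lemma pvPass_len (es : List (List Char)) (st : List Char × List Char × Bool)
    (h : ∀ e ∈ es, e ≠ []) :
    (es.foldl pvPassA st).1.length ≤ st.1.length ∧
    ((es.foldl pvPassA st) = st ∨ (es.foldl pvPassA st).1.length < st.1.length) := by
  induction es generalizing st with
  | nil => simp
  | cons e es ih =>
    simp only [List.foldl_cons]
    have he : e ≠ [] := h e (by simp)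
    have key : (pvPassA st e).1.length ≤ st.1.length ∧
        ((pvPassA st e) = st ∨ (pvPassA st e).1.length < st.1.length) := by
      unfold pvPassA
      split
      · next hf =>
        have hsuf : e <:+ st.1 := (PySem.Chars.endswith_iff _ _).mp hf
        have hle : e.length ≤ st.1.length := hsuf.length_le
        have hpos : 0 < e.length := List.length_pos_of_ne_nil he
        rw [PySem.List.slice_to_neg_natCast _ _ hpos]
        refine ⟨by simp [List.length_take], Or.inr ?_⟩
        simp only [List.length_take]
        omega
      · exact ⟨le_rfl, Or.inl rfl⟩
    obtain ⟨k1, k2⟩ := key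
    obtain ⟨i1, i2⟩ := ih (pvPassA st e) (fun x hx => h x (by simp [hx]))
    refine ⟨le_trans i1 k1, ?_⟩
    rcases k2 with hk | hk
    · rw [hk] at i1 i2 ⊢; exact i2
    · exact Or.inr (lt_of_le_of_lt i1 hk)

-- the 'while needToContinue' loop of A
def pvLoopA (s en : List Char) : List Char × List Char :=
  let r := pvEndsA.foldl pvPassA (s, en, false)
  if hb : r.2.2 then pvLoopA r.1 r.2.1 else (r.1, r.2.1)
termination_by s.length
decreasing_by
  have h := pvPass_len pvEndsA (s, en, false) (by decide)
  have hb' : (List.foldl pvPassA (s, en, false) pvEndsA).2.2 = true := hb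
  rcases h.2 with he | he
  · rw [he] at hb'; simp at hb'
  · exact he

def typeAndDecorators (s : String) : String × String :=
  let l := (PySem.Str.strip s).toList
  let r := pvLoopA l []
  (String.ofList r.1, String.ofList r.2)

-- ===== PORT B =====
-- the backward index scan: s[i-1] is always in range (0 < i ≤ len s), so getD's default is never read
def pvLoopB (l : List Char) (i : Nat) : Nat :=
  if i = 0 then i
  else if l.getD (i - 1) ' ' = ' ' ∨ l.getD (i - 1) ' ' = '*' ∨ l.getD (i - 1) ' ' = '&' then
    pvLoopB l (i - 1)
  else if 5 ≤ i ∧ PySem.List.slice l (some ((i : Int) - 5)) (some (i : Int)) = ['c','o','n','s','t'] then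
    pvLoopB l (i - 5)
  else i
termination_by i
decreasing_by all_goals omega

def typeAndDecorators_alt (s : String) : String × String :=
  let l := (PySem.Str.strip s).toList
  let i := pvLoopB l l.length
  (String.ofList (PySem.List.slice l none (some (i : Int))),
   String.ofList (PySem.List.slice l (some (i : Int)) none))

-- ===== PRECONDITION & SPEC =====
def Spec_typeAndDecorators (s : String) (out : String × String) : Prop := out = typeAndDecorators_alt s
instance (s : String) (out : String × String) : Decidable (Spec_typeAndDecorators s out) := by unfold Spec_typeAndDecorators; infer_instance

-- ===== CLAIM (what is proved, stated in full; the proofs are below) =====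
def Claim_equal_typeAndDecorators : Prop := ∀ (s : String), Dom_typeAndDecorators s → Spec_typeAndDecorators s (typeAndDecorators s)

-- ===== LEMMAS AND PROOFS =====

-- length of the unique token ending l (0 if none): fixed by the last character(s)
def pvTok (l : List Char) : Nat :=
  if [' '] <:+ l ∨ ['*'] <:+ l ∨ ['&'] <:+ l then 1
  else if ['c','o','n','s','t'] <:+ l then 5 else 0

lemma suffix_singleton_iff (c : Char) (l : List Char) : [c] <:+ l ↔ l.getLast? = some c := by
  constructor
  · rintro ⟨t, rfl⟩
    rw [List.getLast?_append_of_ne_nil t (by simp)]; rfl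
  · intro h
    have hne : l ≠ [] := fun hl => by simp [hl] at h
    refine ⟨l.dropLast, ?_⟩
    have h2 : l.getLast hne = c := by
      rwa [List.getLast?_eq_some_getLast hne, Option.some_inj] at h
    rw [← h2]
    exact List.dropLast_append_getLast hne

lemma pvTok_le (l : List Char) : pvTok l ≤ l.length := by
  unfold pvTok
  split_ifs with h1 h2
  · rcases h1 with h | h | h <;> simpa using h.length_le
  · simpa using h2.length_le
  · omega

-- reference loop: strip exactly one token per step
def pvR (l en : List Char) : List Char × List Char :=
  if _h : pvTok l = 0 then (l, en)
  else pvR (l.take (l.length - pvTok l)) (l.drop (l.length - pvTok l) ++ en)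
termination_by l.length
decreasing_by
  have h1 : pvTok l ≤ l.length := pvTok_le l
  simp only [List.length_take]
  omega

lemma drop_of_suffix {e l : List Char} (h : e <:+ l) :
    l.drop (l.length - e.length) = e := by
  obtain ⟨t, rfl⟩ := h
  simp

lemma suffix_iff_drop {e l : List Char} (_h : e.length ≤ l.length) :
    e <:+ l ↔ l.drop (l.length - e.length) = e := by
  constructor
  · exact drop_of_suffix
  · intro hd
    have ht := List.take_append_drop (l.length - e.length) l
    rw [hd] at ht
    exact ⟨_, ht⟩

lemma tok_of_suffix_single {l : List Char} {c : Char}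
    (hc : c = ' ' ∨ c = '*' ∨ c = '&') (h : [c] <:+ l) : pvTok l = 1 := by
  unfold pvTok
  rw [if_pos]
  rcases hc with rfl | rfl | rfl
  · exact Or.inl h
  · exact Or.inr (Or.inl h)
  · exact Or.inr (Or.inr h)

lemma tok_of_suffix_const {l : List Char} (h : ['c','o','n','s','t'] <:+ l) : pvTok l = 5 := by
  have hg : l.getLast? = some 't' := by
    obtain ⟨t, rfl⟩ := h
    rw [List.getLast?_append_of_ne_nil t (by simp)]; rfl
  unfold pvTok
  rw [if_neg, if_pos h]
  rintro (hs | hs | hs) <;>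
    · rw [suffix_singleton_iff, hg, Option.some_inj] at hs
      exact absurd hs (by decide)

-- one firing branch of A's for-loop is exactly one pvR step
lemma pass_step_R (st : List Char × List Char × Bool) (e : List Char) (he : e ∈ pvEndsA) :
    pvR (pvPassA st e).1 (pvPassA st e).2.1 = pvR st.1 st.2.1 := by
  unfold pvPassA
  split
  · next hf =>
    have hsuf : e <:+ st.1 := (PySem.Chars.endswith_iff _ _).mp hf
    have hpos : 0 < e.length := by fin_cases he <;> simp
    have htok : pvTok st.1 = e.length := by
      fin_cases he
      · exact tok_of_suffix_single (by simp) hsuf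
      · exact tok_of_suffix_single (by simp) hsuf
      · exact tok_of_suffix_single (by simp) hsuf
      · exact tok_of_suffix_const hsuf
    conv_rhs => rw [pvR]
    rw [dif_neg (by omega)]
    rw [htok, drop_of_suffix hsuf, PySem.List.slice_to_neg_natCast _ _ hpos]
  · rfl

lemma fold_R (es : List (List Char)) (st : List Char × List Char × Bool)
    (hs : ∀ e ∈ es, e ∈ pvEndsA) :
    pvR (es.foldl pvPassA st).1 (es.foldl pvPassA st).2.1 = pvR st.1 st.2.1 := by
  induction es generalizing st with
  | nil => rfl
  | cons e es ih =>
    simp only [List.foldl_cons]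
    rw [ih (pvPassA st e) (fun x hx => hs x (by simp [hx]))]
    exact pass_step_R st e (hs e (by simp))

lemma cont_mono (es : List (List Char)) (st : List Char × List Char × Bool)
    (h : st.2.2 = true) : (es.foldl pvPassA st).2.2 = true := by
  induction es generalizing st with
  | nil => exact h
  | cons e es ih =>
    simp only [List.foldl_cons]
    refine ih _ ?_
    unfold pvPassA
    split <;> simp [h]

lemma nofire (es : List (List Char)) (st : List Char × List Char × Bool)
    (h0 : st.2.2 = false) (h : (es.foldl pvPassA st).2.2 = false) :
    es.foldl pvPassA st = st ∧ ∀ e ∈ es, PySem.Chars.endswith st.1 e = false := by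
  induction es generalizing st with
  | nil => exact ⟨rfl, by simp⟩
  | cons e es ih =>
    simp only [List.foldl_cons] at h ⊢
    by_cases hf : PySem.Chars.endswith st.1 e = true
    · exfalso
      have hc : (pvPassA st e).2.2 = true := by unfold pvPassA; rw [if_pos hf]
      rw [cont_mono es _ hc] at h
      simp at h
    · have hfe : PySem.Chars.endswith st.1 e = false := by simpa using hf
      have hst : pvPassA st e = st := by unfold pvPassA; rw [if_neg hf]
      rw [hst] at h ⊢
      obtain ⟨h1, h2⟩ := ih st h0 h
      refine ⟨h1, fun x hx => ?_⟩
      rcases List.mem_cons.mp hx with rfl | hx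
      · exact hfe
      · exact h2 x hx

lemma tok_zero_of_nofire (l : List Char)
    (h : ∀ e ∈ pvEndsA, PySem.Chars.endswith l e = false) : pvTok l = 0 := by
  have hs : ∀ e ∈ pvEndsA, ¬ (e <:+ l) := by
    intro e he hsuf
    have := (PySem.Chars.endswith_iff l e).mpr hsuf
    rw [h e he] at this
    simp at this
  unfold pvTok
  rw [if_neg, if_neg]
  · exact hs _ (by simp [pvEndsA])
  · rintro (hx | hx | hx)
    · exact hs _ (by simp [pvEndsA]) hx
    · exact hs _ (by simp [pvEndsA]) hx
    · exact hs _ (by simp [pvEndsA]) hx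

-- A's loop computes the one-token-per-step reference
theorem loopA_eq_R (l en : List Char) : pvLoopA l en = pvR l en := by
  rw [pvLoopA]
  by_cases hb : (pvEndsA.foldl pvPassA (l, en, false)).2.2 = true
  · rw [dif_pos hb]
    have hlt : (pvEndsA.foldl pvPassA (l, en, false)).1.length < l.length := by
      have h := pvPass_len pvEndsA (l, en, false) (by decide)
      rcases h.2 with he | he
      · rw [he] at hb; simp at hb
      · exact he
    rw [loopA_eq_R _ _]
    exact fold_R pvEndsA (l, en, false) (fun e he => he)
  · rw [dif_neg hb]
    have hnf := nofire pvEndsA (l, en, false) rfl (by simpa using hb)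
    rw [hnf.1, pvR, dif_pos (tok_zero_of_nofire l hnf.2)]
termination_by l.length
decreasing_by exact hlt

lemma loopB_le (l : List Char) (i : Nat) : pvLoopB l i ≤ i := by
  fun_induction pvLoopB l i <;> omega

-- the scan only reads l.take i
lemma loopB_take : ∀ i : Nat, ∀ l : List Char, i ≤ l.length →
    pvLoopB (l.take i) i = pvLoopB l i := by
  intro i
  induction i using Nat.strong_induction_on with
  | _ i ih =>
    intro l hle
    by_cases h0 : i = 0
    · subst h0
      conv_lhs => rw [pvLoopB]
      conv_rhs => rw [pvLoopB]
      simp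
    · have hget : (l.take i).getD (i - 1) ' ' = l.getD (i - 1) ' ' := by
        rw [List.getD_eq_getElem?_getD, List.getD_eq_getElem?_getD,
          List.getElem?_take_of_lt (by omega)]
      conv_lhs => rw [pvLoopB]
      conv_rhs => rw [pvLoopB]
      rw [if_neg h0, if_neg h0, hget]
      split
      · have ha : pvLoopB ((l.take i).take (i - 1)) (i - 1) = pvLoopB (l.take i) (i - 1) :=
          ih (i - 1) (by omega) (l.take i) (by simp; omega)
        have hb : pvLoopB (l.take (i - 1)) (i - 1) = pvLoopB l (i - 1) :=
          ih (i - 1) (by omega) l (by omega)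
        rw [← ha, List.take_take, min_eq_left (by omega), hb]
      · by_cases h5 : 5 ≤ i
        · have hs : PySem.List.slice (l.take i) (some ((i : Int) - 5)) (some (i : Int)) =
              PySem.List.slice l (some ((i : Int) - 5)) (some (i : Int)) := by
            have hcast : ((i : Int) - 5) = ((i - 5 : Nat) : Int) := by omega
            rw [hcast, PySem.List.slice_natCast, PySem.List.slice_natCast, List.drop_take]
            have h55 : i - (i - 5) = 5 := by omega
            rw [h55, List.take_take]
            simp
          by_cases hc : 5 ≤ i ∧ PySem.List.slice l (some ((i : Int) - 5)) (some (i : Int)) =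
              (['c','o','n','s','t'] : List Char)
          · rw [if_pos ⟨hc.1, hs.trans hc.2⟩, if_pos hc]
            have ha : pvLoopB ((l.take i).take (i - 5)) (i - 5) = pvLoopB (l.take i) (i - 5) :=
              ih (i - 5) (by omega) (l.take i) (by simp; omega)
            have hb : pvLoopB (l.take (i - 5)) (i - 5) = pvLoopB l (i - 5) :=
              ih (i - 5) (by omega) l (by omega)
            rw [← ha, List.take_take, min_eq_left (by omega), hb]
          · rw [if_neg (fun hx => hc ⟨hx.1, hs.symm.trans hx.2⟩), if_neg hc]
        · rw [if_neg (fun hx => h5 hx.1), if_neg (fun hx => h5 hx.1)]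

-- the const condition of the scan at i = length is exactly the const-suffix test
lemma const_cond_iff (l : List Char) :
    (5 ≤ l.length ∧ PySem.List.slice l (some ((l.length : Int) - 5))
      (some (l.length : Int)) = (['c','o','n','s','t'] : List Char)) ↔
    (['c','o','n','s','t'] : List Char) <:+ l := by
  constructor
  · rintro ⟨h5, hs⟩
    have hcast : ((l.length : Int) - 5) = ((l.length - 5 : Nat) : Int) := by omega
    rw [hcast, PySem.List.slice_natCast] at hs
    have h55 : l.length - (l.length - 5) = 5 := by omega
    rw [h55] at hs
    have hdl : (l.drop (l.length - 5)).length ≤ 5 := by simp; omega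
    rw [List.take_of_length_le hdl] at hs
    exact (suffix_iff_drop (by simpa using h5)).mpr (by simpa using hs)
  · intro hsuf
    have h5 : 5 ≤ l.length := by simpa using hsuf.length_le
    refine ⟨h5, ?_⟩
    have hd : l.drop (l.length - 5) = ['c','o','n','s','t'] := by
      simpa using drop_of_suffix hsuf
    have hcast : ((l.length : Int) - 5) = ((l.length - 5 : Nat) : Int) := by omega
    have h55 : l.length - (l.length - 5) = 5 := by omega
    rw [hcast, PySem.List.slice_natCast, h55, hd]
    decide

-- first unfold of the scan at i = length, phrased through pvTok
lemma loopB_top (l : List Char) (hne : l ≠ []) :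
    pvLoopB l l.length = if pvTok l = 0 then l.length
      else pvLoopB l (l.length - pvTok l) := by
  have hlen : 0 < l.length := List.length_pos_of_ne_nil hne
  obtain ⟨c, hc⟩ : ∃ c, l.getLast? = some c := by
    cases hg : l.getLast? with
    | none => exact absurd (List.getLast?_eq_none_iff.mp hg) hne
    | some c => exact ⟨c, rfl⟩
  have hgetD : l.getD (l.length - 1) ' ' = c := by
    rw [List.getD_eq_getElem?_getD, ← List.getLast?_eq_getElem?, hc]; rfl
  conv_lhs => rw [pvLoopB]
  rw [if_neg (by omega), hgetD]
  by_cases h1 : c = ' ' ∨ c = '*' ∨ c = '&'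
  · have hsuffs : [' '] <:+ l ∨ ['*'] <:+ l ∨ ['&'] <:+ l := by
      rcases h1 with rfl | rfl | rfl
      · exact Or.inl ((suffix_singleton_iff _ _).mpr hc)
      · exact Or.inr (Or.inl ((suffix_singleton_iff _ _).mpr hc))
      · exact Or.inr (Or.inr ((suffix_singleton_iff _ _).mpr hc))
    have htok : pvTok l = 1 := by unfold pvTok; rw [if_pos hsuffs]
    rw [if_pos h1, htok, if_neg (by omega)]
  · have hns : ¬([' '] <:+ l ∨ ['*'] <:+ l ∨ ['&'] <:+ l) := by
      rintro (hx | hx | hx) <;>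
        · rw [suffix_singleton_iff, hc, Option.some_inj] at hx
          exact h1 (by simp [hx])
    rw [if_neg h1]
    by_cases h2 : (['c','o','n','s','t'] : List Char) <:+ l
    · have htok : pvTok l = 5 := by unfold pvTok; rw [if_neg hns, if_pos h2]
      rw [if_pos ((const_cond_iff l).mpr h2), htok, if_neg (by omega)]
    · have htok : pvTok l = 0 := by unfold pvTok; rw [if_neg hns, if_neg h2]
      rw [if_neg (fun hx => h2 ((const_cond_iff l).mp hx)), htok, if_pos rfl]

-- B's scan result equals the reference
lemma R_eq_loopB : ∀ n : Nat, ∀ l : List Char, l.length = n → ∀ en : List Char,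
    pvR l en = (l.take (pvLoopB l l.length), l.drop (pvLoopB l l.length) ++ en) := by
  intro n
  induction n using Nat.strong_induction_on with
  | _ n ih =>
    intro l hln en
    by_cases h0 : pvTok l = 0
    · rw [pvR, dif_pos h0]
      have hfix : pvLoopB l l.length = l.length := by
        rcases List.eq_nil_or_concat l with rfl | ⟨t, c, rfl⟩
        · rw [pvLoopB]; rfl
        · rw [loopB_top _ (by simp), if_pos h0]
      rw [hfix]
      simp
    · have hne : l ≠ [] := by
        rintro rfl
        exact h0 rfl
      have hk := pvTok_le l
      have hkpos : 0 < pvTok l := Nat.pos_of_ne_zero h0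
      set k := pvTok l with hkdef
      rw [pvR, dif_neg h0]
      set l' := l.take (l.length - k) with hl'
      have hl'len : l'.length = l.length - k := by simp [hl']
      have htop : pvLoopB l l.length = pvLoopB l (l.length - k) :=
        (loopB_top l hne).trans (if_neg h0)
      have htake : pvLoopB l' (l.length - k) = pvLoopB l (l.length - k) :=
        loopB_take (l.length - k) l (by omega)
      have hrec := ih (l.length - k) (by omega) l' hl'len (l.drop (l.length - k) ++ en)
      rw [hl'len, htake, ← htop] at hrec
      rw [hrec]
      set j := pvLoopB l l.length with hj
      have hjle : j ≤ l.length - k := by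
        rw [htop]
        exact loopB_le l (l.length - k)
      have e1 : l'.take j = l.take j := by
        rw [hl', List.take_take, min_eq_left (by omega)]
      have e2 : l.drop j = l'.drop j ++ l.drop (l.length - k) := by
        conv_lhs => rw [← List.take_append_drop (l.length - k) l]
        rw [List.drop_append_of_le_length (by rw [← hl']; omega)]
      rw [e1, e2, List.append_assoc]

-- ===== VERDICT (by name: the statement is the Claim_ definition above) =====
theorem typeAndDecorators_spec : Claim_equal_typeAndDecorators := by
  intro s _
  unfold Spec_typeAndDecorators typeAndDecorators typeAndDecorators_alt
  show (String.ofList (pvLoopA (PySem.Str.strip s).toList []).1,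
      String.ofList (pvLoopA (PySem.Str.strip s).toList []).2) =
    (String.ofList (PySem.List.slice (PySem.Str.strip s).toList none
        (some ((pvLoopB (PySem.Str.strip s).toList (PySem.Str.strip s).toList.length : Nat) : Int))),
      String.ofList (PySem.List.slice (PySem.Str.strip s).toList
        (some ((pvLoopB (PySem.Str.strip s).toList (PySem.Str.strip s).toList.length : Nat) : Int)) none))
  generalize (PySem.Str.strip s).toList = l
  rw [loopA_eq_R, R_eq_loopB l.length l rfl [],
    PySem.List.slice_to_natCast, PySem.List.slice_from_natCast]
  simp
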